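-- pv_equiv track=rewrite | github.com/eryilmaz1337/Django-piscine | d1/ex05/all_in.py | capital_city
-- ===== SOURCE A (Python) =====
-- def capital_city(name):
--     # Başkent ve eyalet eşlemeleri
--     states = {
--         "Oregon": "OR",
--         "Alabama": "AL",
--         "New Jersey": "NJ",
--         "Colorado": "CO"
--     }
--
--     capital_cities = {
--         "OR": "Salem",
--         "AL": "Montgomery",
--         "NJ": "Trenton",
--         "CO": "Denver"
--     }
--     orjName = name
--     # Girişin küçük/büyük harf farkını göz ardı etmek için
--     name = name.strip().lower()  # Tüm harfleri küçük yapıyoruz ve baştaki/sondaki boşlukları kaldırıyoruz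
--
--     # Eğer giriş bir başkentse
--     for code, city in capital_cities.items():
--         if name == city.lower():
--             # Eğer şehir, başkentse, o zaman hangi eyalete ait olduğunu bulalım
--             state = next(key for key, value in states.items() if value == code)
--             return f"{city.capitalize()} is the capital of {state}"
--
--     # Eğer giriş bir eyaletse
--     for state, code in states.items():
--         if name == state.lower():
--             return f"{capital_cities[code]} is the capital of {state}"
--
--     return f"{orjName} is neither a capital city nor a state"
-- ===== SOURCE B (Python) =====
-- def capital_city(name):
--     states = {
--         "Oregon": "OR",
--         "Alabama": "AL",
--         "New Jersey": "NJ",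
--         "Colorado": "CO"
--     }
--
--     capital_cities = {
--         "OR": "Salem",
--         "AL": "Montgomery",
--         "NJ": "Trenton",
--         "CO": "Denver"
--     }
--     # one combined table: lowercased state or capital name -> final sentence
--     lookup = {}
--     for state, code in states.items():
--         city = capital_cities[code]
--         lookup[state.lower()] = f"{city} is the capital of {state}"
--         lookup[city.lower()] = f"{city.capitalize()} is the capital of {state}"
--     return lookup.get(name.strip().lower(), f"{name} is neither a capital city nor a state")
-- ===== Notes on version B (the rewrite author's own statement) =====
-- stated objective: simpler
-- what changed: Replaces A's two sequential scans (capitals loop with an inner next() scan over states, then states loop) by one combined dict built in a single pass mapping each lowercased state/capital name to its final sentence, followed by a single .get() with the fallback as default.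
import Mathlib
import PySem

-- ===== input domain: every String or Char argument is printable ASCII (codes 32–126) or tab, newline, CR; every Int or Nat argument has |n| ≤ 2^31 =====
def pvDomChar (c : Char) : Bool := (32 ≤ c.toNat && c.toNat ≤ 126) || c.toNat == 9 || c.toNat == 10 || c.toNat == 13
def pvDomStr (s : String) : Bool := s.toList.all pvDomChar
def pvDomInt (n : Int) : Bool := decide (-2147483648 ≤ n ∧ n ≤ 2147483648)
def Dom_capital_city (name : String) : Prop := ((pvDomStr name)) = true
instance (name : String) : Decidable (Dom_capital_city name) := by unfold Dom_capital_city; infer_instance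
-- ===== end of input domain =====

-- B replaces A's two sequential scans (capitals, then states) by one prebuilt
-- lowercased-name -> sentence table and a single lookup (objective: simpler).

-- ===== PORT A =====
-- str.capitalize(): first char uppercased, rest lowered (exact on ASCII, the only inputs it sees here)
def pyCapitalize (s : String) : String :=
  match s.toList with
  | [] => s
  | c :: rest => String.ofList (PySem.Chars.upperChar c :: PySem.Chars.lower rest)

def pvStatesA : List (String × String) :=
  [("Oregon", "OR"), ("Alabama", "AL"), ("New Jersey", "NJ"), ("Colorado", "CO")]

def pvCapitalsA : List (String × String) :=
  [("OR", "Salem"), ("AL", "Montgomery"), ("NJ", "Trenton"), ("CO", "Denver")]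

-- next(key for key, value in states.items() if value == code); with A's fixed data a
-- state is always found, so the StopIteration arm ("") is unreachable
def pvFindState (code : String) : List (String × String) → String
  | [] => ""
  | (st, v) :: rest => if v = code then st else pvFindState code rest

-- first loop: is the input a capital city?
def pvLoopCities (key : String) : List (String × String) → Option String
  | [] => none
  | (code, city) :: rest =>
      if key = PySem.Str.lower city then
        some (pyCapitalize city ++ " is the capital of " ++ pvFindState code pvStatesA)
      else pvLoopCities key rest

-- second loop: is the input a state?  capital_cities[code] always hits (fixed data), so getD's "" is unreachable
def pvLoopStates (key : String) : List (String × String) → Option String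
  | [] => none
  | (st, code) :: rest =>
      if key = PySem.Str.lower st then
        some ((PySem.Dict.ofList pvCapitalsA).getD code "" ++ " is the capital of " ++ st)
      else pvLoopStates key rest

def capital_city (name : String) : String :=
  let orjName := name
  let key := PySem.Str.lower (PySem.Str.strip name)
  match pvLoopCities key pvCapitalsA with
  | some r => r
  | none =>
    match pvLoopStates key pvStatesA with
    | some r => r
    | none => orjName ++ " is neither a capital city nor a state"

-- ===== PORT B =====
def pvStatesB : List (String × String) :=
  [("Oregon", "OR"), ("Alabama", "AL"), ("New Jersey", "NJ"), ("Colorado", "CO")]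

def pvCapitalsB : PySem.Dict String String :=
  PySem.Dict.ofList [("OR", "Salem"), ("AL", "Montgomery"), ("NJ", "Trenton"), ("CO", "Denver")]

-- the combined table: lowercased state or capital -> final sentence
def pvLookupB : PySem.Dict String String :=
  pvStatesB.foldl
    (fun d p =>
      let city := pvCapitalsB.getD p.2 ""
      (d.insert (PySem.Str.lower p.1) (city ++ " is the capital of " ++ p.1)).insert
        (PySem.Str.lower city) (pyCapitalize city ++ " is the capital of " ++ p.1))
    PySem.Dict.empty

def capital_city_alt (name : String) : String :=
  pvLookupB.getD (PySem.Str.lower (PySem.Str.strip name))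
    (name ++ " is neither a capital city nor a state")

-- ===== PRECONDITION & SPEC =====
def Spec_capital_city (name : String) (out : String) : Prop := out = capital_city_alt name
instance (name : String) (out : String) : Decidable (Spec_capital_city name out) := by unfold Spec_capital_city; infer_instance

-- ===== CLAIM (what is proved, stated in full; the proofs are below) =====
def Claim_equal_capital_city : Prop := ∀ (name : String), Dom_capital_city name → Spec_capital_city name (capital_city name)

-- ===== LEMMAS AND PROOFS =====
lemma pvLookupB_eval :
    pvLookupB = PySem.Dict.mk
      [("oregon", "Salem is the capital of Oregon"),
       ("salem", "Salem is the capital of Oregon"),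
       ("alabama", "Montgomery is the capital of Alabama"),
       ("montgomery", "Montgomery is the capital of Alabama"),
       ("new jersey", "Trenton is the capital of New Jersey"),
       ("trenton", "Trenton is the capital of New Jersey"),
       ("colorado", "Denver is the capital of Colorado"),
       ("denver", "Denver is the capital of Colorado")] := by decide

lemma pvLowSalem : PySem.Str.lower "Salem" = "salem" := by decide
lemma pvLowMont : PySem.Str.lower "Montgomery" = "montgomery" := by decide
lemma pvLowTren : PySem.Str.lower "Trenton" = "trenton" := by decide
lemma pvLowDenv : PySem.Str.lower "Denver" = "denver" := by decide
lemma pvLowOreg : PySem.Str.lower "Oregon" = "oregon" := by decide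
lemma pvLowAlab : PySem.Str.lower "Alabama" = "alabama" := by decide
lemma pvLowNJ : PySem.Str.lower "New Jersey" = "new jersey" := by decide
lemma pvLowColo : PySem.Str.lower "Colorado" = "colorado" := by decide

-- both sides, as a function of the normalized key k and the original name
lemma pv_core (k name : String) :
    (match pvLoopCities k pvCapitalsA with
     | some r => r
     | none =>
       match pvLoopStates k pvStatesA with
       | some r => r
       | none => name ++ " is neither a capital city nor a state") =
    pvLookupB.getD k (name ++ " is neither a capital city nor a state") := by
  by_cases h1 : k = "salem"
  · subst h1
    simp only [show pvLoopCities "salem" pvCapitalsA = some "Salem is the capital of Oregon" from by decide,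
      show pvLookupB.get? "salem" = some "Salem is the capital of Oregon" from by decide, PySem.Dict.getD, Option.getD]
  by_cases h2 : k = "montgomery"
  · subst h2
    simp only [show pvLoopCities "montgomery" pvCapitalsA = some "Montgomery is the capital of Alabama" from by decide,
      show pvLookupB.get? "montgomery" = some "Montgomery is the capital of Alabama" from by decide, PySem.Dict.getD, Option.getD]
  by_cases h3 : k = "trenton"
  · subst h3
    simp only [show pvLoopCities "trenton" pvCapitalsA = some "Trenton is the capital of New Jersey" from by decide,
      show pvLookupB.get? "trenton" = some "Trenton is the capital of New Jersey" from by decide, PySem.Dict.getD, Option.getD]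
  by_cases h4 : k = "denver"
  · subst h4
    simp only [show pvLoopCities "denver" pvCapitalsA = some "Denver is the capital of Colorado" from by decide,
      show pvLookupB.get? "denver" = some "Denver is the capital of Colorado" from by decide, PySem.Dict.getD, Option.getD]
  by_cases h5 : k = "oregon"
  · subst h5
    simp only [show pvLoopCities "oregon" pvCapitalsA = none from by decide,
      show pvLoopStates "oregon" pvStatesA = some "Salem is the capital of Oregon" from by decide,
      show pvLookupB.get? "oregon" = some "Salem is the capital of Oregon" from by decide, PySem.Dict.getD, Option.getD]
  by_cases h6 : k = "alabama"
  · subst h6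
    simp only [show pvLoopCities "alabama" pvCapitalsA = none from by decide,
      show pvLoopStates "alabama" pvStatesA = some "Montgomery is the capital of Alabama" from by decide,
      show pvLookupB.get? "alabama" = some "Montgomery is the capital of Alabama" from by decide, PySem.Dict.getD, Option.getD]
  by_cases h7 : k = "new jersey"
  · subst h7
    simp only [show pvLoopCities "new jersey" pvCapitalsA = none from by decide,
      show pvLoopStates "new jersey" pvStatesA = some "Trenton is the capital of New Jersey" from by decide,
      show pvLookupB.get? "new jersey" = some "Trenton is the capital of New Jersey" from by decide, PySem.Dict.getD, Option.getD]
  by_cases h8 : k = "colorado"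
  · subst h8
    simp only [show pvLoopCities "colorado" pvCapitalsA = none from by decide,
      show pvLoopStates "colorado" pvStatesA = some "Denver is the capital of Colorado" from by decide,
      show pvLookupB.get? "colorado" = some "Denver is the capital of Colorado" from by decide, PySem.Dict.getD, Option.getD]
  rw [show pvLoopCities k pvCapitalsA = none from by
        simp [pvLoopCities, pvCapitalsA, pvLowSalem, pvLowMont, pvLowTren, pvLowDenv, h1, h2, h3, h4],
      show pvLoopStates k pvStatesA = none from by
        simp [pvLoopStates, pvStatesA, pvLowOreg, pvLowAlab, pvLowNJ, pvLowColo, h5, h6, h7, h8]]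
  simp [PySem.Dict.getD, pvLookupB_eval, PySem.Dict.get?,
    Ne.symm h1, Ne.symm h2, Ne.symm h3, Ne.symm h4, Ne.symm h5, Ne.symm h6, Ne.symm h7, Ne.symm h8]

-- ===== VERDICT (by name: the statement is the Claim_ definition above) =====
theorem capital_city_spec : Claim_equal_capital_city := by
  intro name _
  show capital_city name = capital_city_alt name
  simp only [capital_city, capital_city_alt]
  exact pv_core (PySem.Str.lower (PySem.Str.strip name)) name
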